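-- pv_equiv track=rewrite | github.com/rajfw/aop_planner | app.py | render_dependencies_html
-- ===== SOURCE A (Python) =====
-- def get_bu_badge(bu):
--     bu_lower = bu.lower()
--     if "ai" in bu_lower:
--         return "badge-ai"
--     elif "cx" in bu_lower:
--         return "badge-cx"
--     elif "ex" in bu_lower:
--         return "badge-ex"
--     elif "ce" in bu_lower:
--         return "badge-ce"
--     elif "platform" in bu_lower:
--         return "badge-platform"
--     return ""
--
-- def get_dependencies_by_team(dependency_details):
--     """Organize dependencies by team"""
--     team_deps = {}
--     for dep in dependency_details:
--         team = dep.get('team', '')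
--         if team:
--             if team not in team_deps:
--                 team_deps[team] = []
--             team_deps[team].append({
--                 'title': dep.get('title', ''),
--                 'description': dep.get('description', '')
--             })
--     return team_deps
--
-- def render_dependencies_html(dependency_details):
--     """Render dependencies as HTML"""
--     if not dependency_details:
--         return "<p style='color: #6B7280; font-style: italic;'>No dependencies specified</p>"
--
--     team_deps = get_dependencies_by_team(dependency_details)
--
--     html = ""
--     for team, deps in team_deps.items():
--         badge_class = get_bu_badge(team)
--         html += f"""
--         <div class="dependency-item">
--             <div class="dependency-team">
--                 <span class="{badge_class} badge">{team}</span>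
--             </div>
--         """
--         for dep in deps:
--             if dep.get('title') or dep.get('description'):
--                 html += f"""
--                 <div style="margin: 8px 0 8px 10px; padding-left: 10px; border-left: 2px solid #D1D5DB;">
--                     <div class="dependency-title">{dep.get('title', 'Untitled Dependency')}</div>
--                     <div class="dependency-desc">{dep.get('description', 'No description provided')}</div>
--                 </div>
--                 """
--         html += "</div>"
--
--     return html
-- ===== SOURCE B (Python) =====
-- _BADGE_TABLE = [("ai", "badge-ai"), ("cx", "badge-cx"), ("ex", "badge-ex"),
--                 ("ce", "badge-ce"), ("platform", "badge-platform")]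
--
-- def render_dependencies_html(dependency_details):
--     """Single fused pass: build each team's HTML buffer directly while scanning the deps."""
--     if not dependency_details:
--         return "<p style='color: #6B7280; font-style: italic;'>No dependencies specified</p>"
--     buffers = {}
--     for dep in dependency_details:
--         team = dep.get('team', '')
--         if not team:
--             continue
--         if team not in buffers:
--             team_lower = team.lower()
--             badge_class = next((cls for sub, cls in _BADGE_TABLE if sub in team_lower), "")
--             buffers[team] = (
--                 '\n        <div class="dependency-item">\n'
--                 '            <div class="dependency-team">\n'
--                 f'                <span class="{badge_class} badge">{team}</span>\n'
--                 '            </div>\n'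
--                 '        '
--             )
--         title = dep.get('title', '')
--         description = dep.get('description', '')
--         if title or description:
--             buffers[team] += (
--                 '\n                <div style="margin: 8px 0 8px 10px; padding-left: 10px; border-left: 2px solid #D1D5DB;">\n'
--                 f'                    <div class="dependency-title">{title}</div>\n'
--                 f'                    <div class="dependency-desc">{description}</div>\n'
--                 '                </div>\n'
--                 '                '
--             )
--     return "".join(buf + "</div>" for buf in buffers.values())
-- ===== Notes on version B (the rewrite author's own statement) =====
-- stated objective: alternative
-- what changed: Replaced A's two-phase group-by-team-then-render structure with a single fused pass that accumulates each team's HTML buffer directly in an ordered dict (badge computed once on first sight of a team), closing and concatenating the buffers at the end.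
import Mathlib
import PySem

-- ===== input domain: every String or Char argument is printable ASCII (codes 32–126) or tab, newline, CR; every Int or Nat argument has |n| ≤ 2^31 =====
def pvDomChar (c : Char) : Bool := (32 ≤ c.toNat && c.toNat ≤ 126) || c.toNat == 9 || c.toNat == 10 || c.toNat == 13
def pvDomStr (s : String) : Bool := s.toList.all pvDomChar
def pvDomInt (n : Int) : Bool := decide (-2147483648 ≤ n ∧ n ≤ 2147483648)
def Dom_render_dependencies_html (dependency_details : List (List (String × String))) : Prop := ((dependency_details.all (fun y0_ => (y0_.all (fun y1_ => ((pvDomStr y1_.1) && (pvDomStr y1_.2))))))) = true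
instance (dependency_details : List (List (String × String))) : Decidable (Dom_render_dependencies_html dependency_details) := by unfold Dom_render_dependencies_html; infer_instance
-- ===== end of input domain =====

-- B fuses A's group-then-render two-phase structure into one pass that accumulates
-- per-team HTML buffers directly (objective: alternative decomposition, same cost).

-- ===== PORT A =====
-- Common modelling helpers used by both ports: a Python dict argument is an association
-- list, `dep.get(k, dflt)` is first-match lookup; the two f-string templates as functions.
def pvDictGetD (dep : List (String × String)) (k : String) (dflt : String) : String :=
  ((dep.find? (fun p => p.1 == k)).map Prod.snd).getD dflt

def pvHead (badge_class : String) (team : String) : String :=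
  "\n        <div class=\"dependency-item\">\n            <div class=\"dependency-team\">\n                <span class=\"" ++ badge_class ++ " badge\">" ++ team ++ "</span>\n            </div>\n        "

def pvItem (title : String) (description : String) : String :=
  "\n                <div style=\"margin: 8px 0 8px 10px; padding-left: 10px; border-left: 2px solid #D1D5DB;\">\n                    <div class=\"dependency-title\">" ++ title ++ "</div>\n                    <div class=\"dependency-desc\">" ++ description ++ "</div>\n                </div>\n                "

def get_bu_badge (bu : String) : String :=
  let bu_lower := PySem.Str.lower bu
  if PySem.Str.isIn "ai" bu_lower then "badge-ai"
  else if PySem.Str.isIn "cx" bu_lower then "badge-cx"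
  else if PySem.Str.isIn "ex" bu_lower then "badge-ex"
  else if PySem.Str.isIn "ce" bu_lower then "badge-ce"
  else if PySem.Str.isIn "platform" bu_lower then "badge-platform"
  else ""

def get_dependencies_by_team (dependency_details : List (List (String × String))) :
    PySem.Dict String (List (List (String × String))) :=
  dependency_details.foldl (fun team_deps dep =>
    let team := pvDictGetD dep "team" ""
    if team ≠ "" then
      let team_deps := if team_deps.contains team then team_deps else team_deps.insert team []
      team_deps.modify team [] (fun l =>
        l ++ [[("title", pvDictGetD dep "title" ""), ("description", pvDictGetD dep "description" "")]])
    else team_deps) PySem.Dict.empty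

def render_dependencies_html (dependency_details : List (List (String × String))) : String :=
  if dependency_details.isEmpty then
    "<p style='color: #6B7280; font-style: italic;'>No dependencies specified</p>"
  else
    let team_deps := get_dependencies_by_team dependency_details
    team_deps.items.foldl (fun html td =>
      let badge_class := get_bu_badge td.1
      let html := html ++ pvHead badge_class td.1
      let html := td.2.foldl (fun html dep =>
        if pvDictGetD dep "title" "" ≠ "" ∨ pvDictGetD dep "description" "" ≠ "" then
          html ++ pvItem (pvDictGetD dep "title" "Untitled Dependency")
                         (pvDictGetD dep "description" "No description provided")
        else html) html
      html ++ "</div>") ""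

-- ===== PORT B =====
def pvBadgeTable : List (String × String) :=
  [("ai", "badge-ai"), ("cx", "badge-cx"), ("ex", "badge-ex"),
   ("ce", "badge-ce"), ("platform", "badge-platform")]

def render_dependencies_html_alt (dependency_details : List (List (String × String))) : String :=
  if dependency_details.isEmpty then
    "<p style='color: #6B7280; font-style: italic;'>No dependencies specified</p>"
  else
    let buffers := dependency_details.foldl (fun (buffers : PySem.Dict String String) dep =>
      let team := pvDictGetD dep "team" ""
      if team = "" then buffers
      else
        let buffers :=
          if buffers.contains team then buffers
          else
            let team_lower := PySem.Str.lower team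
            let badge_class :=
              ((pvBadgeTable.find? (fun p => PySem.Str.isIn p.1 team_lower)).map Prod.snd).getD ""
            buffers.insert team (pvHead badge_class team)
        let title := pvDictGetD dep "title" ""
        let description := pvDictGetD dep "description" ""
        if title ≠ "" ∨ description ≠ "" then
          buffers.modify team "" (fun b => b ++ pvItem title description)
        else buffers) PySem.Dict.empty
    PySem.Str.join "" ((buffers.items.map (fun x => x.2)).map (fun buf => buf ++ "</div>"))

-- ===== PRECONDITION & SPEC =====
def Spec_render_dependencies_html (dependency_details : List (List (String × String))) (out : String) : Prop := out = render_dependencies_html_alt dependency_details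
instance (dependency_details : List (List (String × String))) (out : String) : Decidable (Spec_render_dependencies_html dependency_details out) := by unfold Spec_render_dependencies_html; infer_instance

-- ===== CLAIM (what is proved, stated in full; the proofs are below) =====
def Claim_equal_render_dependencies_html : Prop := ∀ (dependency_details : List (List (String × String))), Dom_render_dependencies_html dependency_details → Spec_render_dependencies_html dependency_details (render_dependencies_html dependency_details)

-- ===== LEMMAS AND PROOFS =====

-- the per-dep record A's grouping phase stores
def pvEntry (dep : List (String × String)) : List (String × String) :=
  [("title", pvDictGetD dep "title" ""), ("description", pvDictGetD dep "description" "")]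

-- rendering of one team's collected dep records (A's inner loop from an empty accumulator)
def pvRI : List (List (String × String)) → String
  | [] => ""
  | d :: ds =>
      (if pvDictGetD d "title" "" ≠ "" ∨ pvDictGetD d "description" "" ≠ "" then
        pvItem (pvDictGetD d "title" "Untitled Dependency")
               (pvDictGetD d "description" "No description provided")
      else "") ++ pvRI ds

def pvHdr (t : String) : String := pvHead (get_bu_badge t) t

-- the value relation between A's grouping dict and B's buffer dict, entrywise
def pvG (q : String × List (List (String × String))) : String × String :=
  (q.1, pvHdr q.1 ++ pvRI q.2)

def pvConcat : List String → String
  | [] => ""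
  | s :: rest => s ++ pvConcat rest

theorem pvBadge_alt (t : String) :
    ((pvBadgeTable.find? (fun p => PySem.Str.isIn p.1 (PySem.Str.lower t))).map Prod.snd).getD ""
      = get_bu_badge t := by
  simp only [pvBadgeTable, get_bu_badge, List.find?]
  split_ifs <;> simp_all

theorem pvJoin_empty (parts : List String) : PySem.Str.join "" parts = pvConcat parts := by
  induction parts with
  | nil => rfl
  | cons p rest ih =>
      cases rest with
      | nil => simp [PySem.Str.join, PySem.Chars.join, pvConcat, List.intercalate]
      | cons q r =>
          rw [pvConcat, ← ih]
          simp only [PySem.Str.join, List.map_cons, PySem.Chars.join_cons_cons]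
          simp [String.ofList_append, String.ofList_toList]

theorem pvEntry_title (dep : List (String × String)) (dflt : String) :
    pvDictGetD (pvEntry dep) "title" dflt = pvDictGetD dep "title" "" := rfl
theorem pvEntry_desc (dep : List (String × String)) (dflt : String) :
    pvDictGetD (pvEntry dep) "description" dflt = pvDictGetD dep "description" "" := rfl

theorem pvRI_single (e : List (String × String)) :
    pvRI [e] = (if pvDictGetD e "title" "" ≠ "" ∨ pvDictGetD e "description" "" ≠ "" then
        pvItem (pvDictGetD e "title" "Untitled Dependency")
               (pvDictGetD e "description" "No description provided")
      else "") := by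
  simp [pvRI]

theorem pvRI_append (l : List (List (String × String))) (e : List (String × String)) :
    pvRI (l ++ [e]) = pvRI l ++ pvRI [e] := by
  induction l with
  | nil => simp [pvRI]
  | cons d ds ih => simp [pvRI, ih, String.append_assoc]

theorem pvInnerA (deps : List (List (String × String))) (a : String) :
    deps.foldl (fun html dep =>
        if pvDictGetD dep "title" "" ≠ "" ∨ pvDictGetD dep "description" "" ≠ "" then
          html ++ pvItem (pvDictGetD dep "title" "Untitled Dependency")
                         (pvDictGetD dep "description" "No description provided")
        else html) a = a ++ pvRI deps := by
  induction deps generalizing a with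
  | nil => simp [pvRI]
  | cons d ds ih =>
      rw [List.foldl_cons, ih, pvRI]
      split_ifs <;> simp [String.append_assoc]

theorem pvOuterA (items : List (String × List (List (String × String)))) (a : String) :
    items.foldl (fun html td =>
      let badge_class := get_bu_badge td.1
      let html := html ++ pvHead badge_class td.1
      let html := td.2.foldl (fun html dep =>
        if pvDictGetD dep "title" "" ≠ "" ∨ pvDictGetD dep "description" "" ≠ "" then
          html ++ pvItem (pvDictGetD dep "title" "Untitled Dependency")
                         (pvDictGetD dep "description" "No description provided")
        else html) html
      html ++ "</div>") a
    = a ++ pvConcat (items.map (fun q => pvHdr q.1 ++ pvRI q.2 ++ "</div>")) := by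
  induction items generalizing a with
  | nil => simp [pvConcat]
  | cons q rest ih =>
      rw [List.foldl_cons, ih, List.map_cons, pvConcat]
      simp only [pvInnerA, pvHdr]
      simp [String.append_assoc]

-- named step functions (proof-side names for the two ports' loop bodies)
def pvAstep (team_deps : PySem.Dict String (List (List (String × String))))
    (dep : List (String × String)) : PySem.Dict String (List (List (String × String))) :=
  let team := pvDictGetD dep "team" ""
  if team ≠ "" then
    let team_deps := if team_deps.contains team then team_deps else team_deps.insert team []
    team_deps.modify team [] (fun l =>
      l ++ [[("title", pvDictGetD dep "title" ""), ("description", pvDictGetD dep "description" "")]])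
  else team_deps

def pvBstep (buffers : PySem.Dict String String) (dep : List (String × String)) :
    PySem.Dict String String :=
  let team := pvDictGetD dep "team" ""
  if team = "" then buffers
  else
    let buffers :=
      if buffers.contains team then buffers
      else
        let team_lower := PySem.Str.lower team
        let badge_class :=
          ((pvBadgeTable.find? (fun p => PySem.Str.isIn p.1 team_lower)).map Prod.snd).getD ""
        buffers.insert team (pvHead badge_class team)
    let title := pvDictGetD dep "title" ""
    let description := pvDictGetD dep "description" ""
    if title ≠ "" ∨ description ≠ "" then
      buffers.modify team "" (fun b => b ++ pvItem title description)
    else buffers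

theorem pvAstep_nodup (td : PySem.Dict String (List (List (String × String))))
    (dep : List (String × String)) (hnd : td.keys.Nodup) : (pvAstep td dep).keys.Nodup := by
  unfold pvAstep PySem.Dict.modify
  by_cases hteam : pvDictGetD dep "team" "" = ""
  · simp [hteam]; exact hnd
  · simp only [if_neg (by simpa using hteam), ite_not]
    by_cases hc : td.contains (pvDictGetD dep "team" "") = true
    · simp only [if_pos hc]
      rw [PySem.Dict.keys_insert_of_contains _ _ hc]
      exact hnd
    · have hc' : td.contains (pvDictGetD dep "team" "") = false := by simpa using hc
      simp only [hc', Bool.false_eq_true, if_false]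
      rw [PySem.Dict.keys_insert_of_contains]
      · exact PySem.Dict.nodup_keys_insert _ _ _ hnd
      · exact PySem.Dict.contains_insert_self _ _ _

theorem pvStepRel (td : PySem.Dict String (List (List (String × String))))
    (bd : PySem.Dict String String) (dep : List (String × String))
    (hnd : td.keys.Nodup) (hrel : bd.items = td.items.map pvG) :
    (pvBstep bd dep).items = (pvAstep td dep).items.map pvG := by
  by_cases hteam : pvDictGetD dep "team" "" = ""
  · unfold pvAstep pvBstep
    simp [hteam, hrel]
  · have hcontains : bd.contains (pvDictGetD dep "team" "") = td.contains (pvDictGetD dep "team" "") := by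
      simp [PySem.Dict.contains, hrel, List.any_map]
      rfl
    set team := pvDictGetD dep "team" "" with hteamdef
    set e := pvEntry dep with hedef
    by_cases hc : td.contains team = true
    · -- team already grouped
      obtain ⟨pr, hfind⟩ : ∃ pr, td.items.find? (fun p => p.1 == team) = some pr := by
        cases hf : td.items.find? (fun p => p.1 == team) with
        | some pr => exact ⟨pr, rfl⟩
        | none =>
            exfalso
            rw [List.find?_eq_none] at hf
            simp only [PySem.Dict.contains, List.any_eq_true] at hc
            obtain ⟨p, hp, hpe⟩ := hc
            exact hf p hp hpe
      have hpr1 : pr.1 = team := by simpa using List.find?_some hfind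
      have hget : td.get? team = some pr.2 := by simp [PySem.Dict.get?, hfind]
      have hbfind : bd.items.find? (fun p => p.1 == team) = some (pvG pr) := by
        rw [hrel, List.find?_map]
        have : ((fun p : String × String => p.1 == team) ∘ pvG)
            = (fun p : String × List (List (String × String)) => p.1 == team) := rfl
        rw [this, hfind]
        rfl
      have hbget : bd.getD team "" = pvHdr team ++ pvRI pr.2 := by
        simp [PySem.Dict.getD, PySem.Dict.get?, hbfind, pvG, hpr1]
      have hval : ∀ p ∈ td.items, p.1 = team → p.2 = pr.2 := by
        intro p hp hp1
        have h1 : td.get? p.1 = some p.2 := PySem.Dict.get?_of_mem_items td hp hnd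
        rw [hp1, hget] at h1
        exact (Option.some_inj.mp h1).symm
      have hAitems : (pvAstep td dep).items
          = td.items.map (fun p => if p.1 == team then (team, pr.2 ++ [e]) else p) := by
        unfold pvAstep
        simp only [← hteamdef, if_neg (by simpa using hteam), ite_not, if_pos hc]
        show (td.modify team [] (fun l => l ++ [e])).items = _
        unfold PySem.Dict.modify
        rw [PySem.Dict.items_insert_of_contains _ _ hc, PySem.Dict.getD, hget]
        rfl
      by_cases hcnd : pvDictGetD dep "title" "" ≠ "" ∨ pvDictGetD dep "description" "" ≠ ""
      · -- item appended
        have hB : (pvBstep bd dep).items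
            = bd.items.map (fun p => if p.1 == team then
                (team, bd.getD team "" ++ pvItem (pvDictGetD dep "title" "") (pvDictGetD dep "description" "")) else p) := by
          unfold pvBstep
          simp only [← hteamdef, if_neg hteam, hcontains, if_pos hc, if_pos hcnd]
          unfold PySem.Dict.modify
          rw [PySem.Dict.items_insert_of_contains _ _ (by rw [hcontains]; exact hc)]
        rw [hB, hAitems, hrel, List.map_map, List.map_map]
        apply List.map_congr_left
        intro p hp
        by_cases hpk : p.1 = team
        · have hpk' : (p.1 == team) = true := by simpa using hpk
          simp only [Function.comp, pvG, hpk', if_pos]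
          rw [pvRI_append, pvRI_single]
          simp only [hedef, pvEntry_title, pvEntry_desc, if_pos hcnd]
          rw [hbget, String.append_assoc]
        · have hpk' : (p.1 == team) = false := by simpa using hpk
          simp [Function.comp, pvG, hpk']
      · -- filtered out: buffers unchanged, A's appended record renders to ""
        have hB : (pvBstep bd dep).items = bd.items := by
          unfold pvBstep
          simp only [← hteamdef, if_neg hteam, hcontains, if_pos hc, if_neg hcnd]
        rw [hB, hAitems, hrel, List.map_map]
        apply List.map_congr_left
        intro p hp
        by_cases hpk : p.1 = team
        · have hpk' : (p.1 == team) = true := by simpa using hpk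
          simp only [Function.comp, pvG, hpk', if_pos]
          have hp2 : p.2 = pr.2 := hval p hp hpk
          rw [pvRI_append, pvRI_single]
          simp only [hedef, pvEntry_title, pvEntry_desc, if_neg hcnd]
          rw [String.append_empty, ← hp2, hpk]
        · have hpk' : (p.1 == team) = false := by simpa using hpk
          simp [Function.comp, pvG, hpk']
    · -- new team
      have hc' : td.contains team = false := by simpa using hc
      have hbc' : bd.contains team = false := by rw [hcontains]; exact hc'
      have hAitems : (pvAstep td dep).items = td.items ++ [(team, [e])] := by
        unfold pvAstep
        simp only [← hteamdef, if_neg (by simpa using hteam), ite_not, hc', Bool.false_eq_true, if_false]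
        unfold PySem.Dict.modify
        rw [PySem.Dict.items_insert_of_contains _ _ (PySem.Dict.contains_insert_self _ _ _),
            PySem.Dict.getD_insert, PySem.Dict.items_insert_of_not_contains _ _ hc']
        rw [List.map_append, List.map_congr_left (g := id) ?_, List.map_id]
        · simp [hedef, pvEntry]
        · intro p hp
          have : (p.1 == team) = false := by
            simp only [PySem.Dict.contains, List.any_eq_false] at hc'
            simpa using hc' p hp
          simp [this]
      have hBins : ∀ v, ((bd.insert team v).items) = bd.items ++ [(team, v)] :=
        fun v => PySem.Dict.items_insert_of_not_contains _ _ hbc'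
      have hhdr : pvHead (((pvBadgeTable.find? (fun p => PySem.Str.isIn p.1 (PySem.Str.lower team))).map Prod.snd).getD "") team = pvHdr team := by
        rw [pvBadge_alt]; rfl
      by_cases hcnd : pvDictGetD dep "title" "" ≠ "" ∨ pvDictGetD dep "description" "" ≠ ""
      · have hB : (pvBstep bd dep).items
            = bd.items ++ [(team, pvHdr team ++ pvItem (pvDictGetD dep "title" "") (pvDictGetD dep "description" ""))] := by
          unfold pvBstep
          simp only [← hteamdef, if_neg hteam, hbc', Bool.false_eq_true, if_false, if_pos hcnd]
          unfold PySem.Dict.modify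
          rw [hhdr]
          rw [PySem.Dict.items_insert_of_contains _ _ (PySem.Dict.contains_insert_self _ _ _),
              PySem.Dict.getD_insert, hBins]
          rw [List.map_append, List.map_congr_left (g := id) ?_, List.map_id]
          · simp
          · intro p hp
            have : (p.1 == team) = false := by
              simp only [PySem.Dict.contains, List.any_eq_false] at hbc'
              simpa using hbc' p hp
            simp [this]
        rw [hB, hAitems, List.map_append, hrel]
        simp only [List.map_cons, List.map_nil, pvG, pvRI_single]
        simp only [hedef, pvEntry_title, pvEntry_desc, if_pos hcnd]
      · have hB : (pvBstep bd dep).items = bd.items ++ [(team, pvHdr team)] := by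
          unfold pvBstep
          simp only [← hteamdef, if_neg hteam, hbc', Bool.false_eq_true, if_false, if_neg hcnd]
          rw [hhdr, hBins]
        rw [hB, hAitems, List.map_append, hrel]
        simp only [List.map_cons, List.map_nil, pvG, pvRI_single]
        simp only [hedef, pvEntry_title, pvEntry_desc, if_neg hcnd, String.append_empty]

-- main invariant: B's buffer dict mirrors A's grouping dict through pvG
theorem pvInv (dd : List (List (String × String)))
    (td : PySem.Dict String (List (List (String × String)))) (bd : PySem.Dict String String)
    (hnd : td.keys.Nodup) (hrel : bd.items = td.items.map pvG) :
    (dd.foldl pvBstep bd).items = (dd.foldl pvAstep td).items.map pvG := by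
  induction dd generalizing td bd with
  | nil => exact hrel
  | cons dep rest ih =>
      rw [List.foldl_cons, List.foldl_cons]
      exact ih _ _ (pvAstep_nodup td dep hnd) (pvStepRel td bd dep hnd hrel)

-- ===== VERDICT (by name: the statement is the Claim_ definition above) =====
theorem render_dependencies_html_spec : Claim_equal_render_dependencies_html := by
  intro dd _
  unfold Spec_render_dependencies_html
  cases dd with
  | nil => rfl
  | cons d ds =>
      have hA : render_dependencies_html (d :: ds)
          = ((d :: ds).foldl pvAstep PySem.Dict.empty).items.foldl (fun html td =>
              let badge_class := get_bu_badge td.1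
              let html := html ++ pvHead badge_class td.1
              let html := td.2.foldl (fun html dep =>
                if pvDictGetD dep "title" "" ≠ "" ∨ pvDictGetD dep "description" "" ≠ "" then
                  html ++ pvItem (pvDictGetD dep "title" "Untitled Dependency")
                                 (pvDictGetD dep "description" "No description provided")
                else html) html
              html ++ "</div>") "" := rfl
      have hB : render_dependencies_html_alt (d :: ds)
          = PySem.Str.join "" ((((d :: ds).foldl pvBstep PySem.Dict.empty).items.map (fun x => x.2)).map
              (fun buf => buf ++ "</div>")) := rfl
      rw [hA, hB, pvOuterA, pvJoin_empty,
          pvInv (d :: ds) PySem.Dict.empty PySem.Dict.empty (by simp [PySem.Dict.keys, PySem.Dict.empty]) (by simp [PySem.Dict.empty]),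
          List.map_map, List.map_map]
      simp only [String.empty_append]
      rfl
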